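-- pv_equiv track=rewrite | github.com/CostinRaduIonut/CNNandAPI | extraction_temp.py | grouping_subroutine
-- ===== SOURCE A (Python) =====
-- def grouping_subroutine(bb, min_dist, max_dist):
--     line = []
--     grouped_bb = []
--     for i in range(len(bb) - 1):
--         r1 = bb[i]
--         r2 = bb[i + 1]
--         x1, x2 = r1[0], r2[0]
--         w1, w2 = r1[2], r2[2]
--
--         xc1 = x1 + w1 // 2
--         xc2 = x2 + w2 // 2
--
--         right = x1 + w1
--         left = x2
--
--         dx = abs(xc2 - xc1)
--         if abs(right - left) < min_dist // 2:
--             line.append(r1)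
--         else:
--             line.append(r1)
--             grouped_bb.append(line)
--             line = []
--     line.append(bb[-1])
--     grouped_bb.append(line)
--
--     return grouped_bb
-- ===== SOURCE B (Python) =====
-- def grouping_subroutine(bb, min_dist, max_dist):
--     breaks = [i + 1 for i in range(len(bb) - 1)
--               if abs((bb[i][0] + bb[i][2]) - bb[i + 1][0]) >= min_dist // 2]
--     groups = []
--     start = 0
--     for b in breaks + [len(bb)]:
--         groups.append(bb[start:b])
--         start = b
--     return groups
-- ===== Notes on version B (the rewrite author's own statement) =====
-- stated objective: alternative
-- what changed: B first computes all break indices with one comprehension and then partitions the list by slicing between consecutive boundaries, instead of A's streaming accumulator that appends to a running line and flushes it at each break.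
import Mathlib
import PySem

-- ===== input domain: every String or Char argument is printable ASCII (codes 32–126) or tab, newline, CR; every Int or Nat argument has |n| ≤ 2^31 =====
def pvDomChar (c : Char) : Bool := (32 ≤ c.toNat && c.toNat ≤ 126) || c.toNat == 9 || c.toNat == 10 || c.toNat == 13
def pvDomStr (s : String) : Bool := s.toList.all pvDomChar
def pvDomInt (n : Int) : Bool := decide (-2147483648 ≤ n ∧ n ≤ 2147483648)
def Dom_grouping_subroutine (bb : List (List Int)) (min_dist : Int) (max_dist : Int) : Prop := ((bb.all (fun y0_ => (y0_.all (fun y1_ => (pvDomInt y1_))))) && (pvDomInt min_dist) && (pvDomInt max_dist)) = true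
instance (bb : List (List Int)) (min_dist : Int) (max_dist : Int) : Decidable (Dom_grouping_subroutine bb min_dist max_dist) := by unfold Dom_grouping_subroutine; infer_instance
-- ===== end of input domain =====

-- B groups the boxes by first listing all break indices and then slicing between
-- consecutive boundaries, instead of A's running accumulator flushed at each break
-- (alternative decomposition, same O(n) cost).

-- ===== PORT A =====
-- loop body of A's for-loop (state = (line, grouped_bb))
def pvStepA (bb : List (List Int)) (min_dist : Int) (s : List (List Int) × List (List (List Int))) (i : Int) : List (List Int) × List (List (List Int)) :=
  let r1 := PySem.List.pyGetD bb i []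
  let r2 := PySem.List.pyGetD bb (i + 1) []
  let x1 := PySem.List.pyGetD r1 0 0
  let x2 := PySem.List.pyGetD r2 0 0
  let w1 := PySem.List.pyGetD r1 2 0
  let w2 := PySem.List.pyGetD r2 2 0
  let xc1 := x1 + PySem.Int.floordiv w1 2
  let xc2 := x2 + PySem.Int.floordiv w2 2
  let right := x1 + w1
  let left := x2
  let _dx := |xc2 - xc1|
  if |right - left| < PySem.Int.floordiv min_dist 2 then
    (s.1 ++ [r1], s.2)
  else
    ([], s.2 ++ [s.1 ++ [r1]])

def grouping_subroutine (bb : List (List Int)) (min_dist : Int) (max_dist : Int) : List (List (List Int)) :=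
  let s := (PySem.List.pyRange 0 ((bb.length : Int) - 1) 1).foldl (pvStepA bb min_dist) ([], [])
  s.2 ++ [s.1 ++ [PySem.List.pyGetD bb (-1) []]]

-- ===== PORT B =====
-- the comprehension's filter condition: a break after index i
def pvBreak (bb : List (List Int)) (min_dist : Int) (i : Int) : Bool :=
  decide (PySem.Int.floordiv min_dist 2 ≤
    |PySem.List.pyGetD (PySem.List.pyGetD bb i []) 0 0 + PySem.List.pyGetD (PySem.List.pyGetD bb i []) 2 0
      - PySem.List.pyGetD (PySem.List.pyGetD bb (i + 1) []) 0 0|)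

-- body of B's second loop (state = (groups, start))
def pvEmit (bb : List (List Int)) (s : List (List (List Int)) × Int) (b : Int) : List (List (List Int)) × Int :=
  (s.1 ++ [PySem.List.slice bb (some s.2) (some b)], b)

def grouping_subroutine_alt (bb : List (List Int)) (min_dist : Int) (max_dist : Int) : List (List (List Int)) :=
  let n : Int := (bb.length : Int)
  let breaks := ((PySem.List.pyRange 0 (n - 1) 1).filter (pvBreak bb min_dist)).map (· + 1)
  ((breaks ++ [n]).foldl (pvEmit bb) ([], 0)).1

-- ===== PRECONDITION & SPEC =====
-- Pre_ excludes exactly the inputs where Python A raises IndexError: the empty list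
-- (bb[-1]) and, when the loop runs (len ≥ 2), any row shorter than 3 (r[0]/r[2]).
def Pre_grouping_subroutine (bb : List (List Int)) (min_dist : Int) (max_dist : Int) : Prop :=
  bb ≠ [] ∧ (bb.length = 1 ∨ ∀ r ∈ bb, 3 ≤ r.length)
instance (bb : List (List Int)) (min_dist : Int) (max_dist : Int) : Decidable (Pre_grouping_subroutine bb min_dist max_dist) := by unfold Pre_grouping_subroutine; infer_instance

def pvWitness_grouping_subroutine : List (List Int) × Int × Int :=
  ([[0, 0, 10, 0], [8, 0, 5, 0], [100, 0, 5, 0]], 10, 50)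

def Spec_grouping_subroutine (bb : List (List Int)) (min_dist : Int) (max_dist : Int) (out : List (List (List Int))) : Prop := out = grouping_subroutine_alt bb min_dist max_dist
instance (bb : List (List Int)) (min_dist : Int) (max_dist : Int) (out : List (List (List Int))) : Decidable (Spec_grouping_subroutine bb min_dist max_dist out) := by unfold Spec_grouping_subroutine; infer_instance

-- ===== CLAIM (what is proved, stated in full; the proofs are below) =====
def Claim_equal_grouping_subroutine : Prop := ∀ (bb : List (List Int)) (min_dist : Int) (max_dist : Int), Dom_grouping_subroutine bb min_dist max_dist → Pre_grouping_subroutine bb min_dist max_dist → Spec_grouping_subroutine bb min_dist max_dist (grouping_subroutine bb min_dist max_dist)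

-- ===== LEMMAS AND PROOFS =====

-- A's step, written through B's break condition
lemma pvStepA_eq (bb : List (List Int)) (min_dist : Int) (s : List (List Int) × List (List (List Int))) (i : Int) :
    pvStepA bb min_dist s i =
      if pvBreak bb min_dist i then ([], s.2 ++ [s.1 ++ [PySem.List.pyGetD bb i []]])
      else (s.1 ++ [PySem.List.pyGetD bb i []], s.2) := by
  simp only [pvStepA, pvBreak, decide_eq_true_eq]
  split_ifs with h1 h2 h3 <;>
    first
      | rfl
      | exact absurd h2 (not_le.mpr h1)
      | exact absurd (not_lt.mp h1) h3

-- joint invariant of A's single fold and B's filter-then-fold after the first m indices: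
-- B's running start st is a break boundary ≤ m, A's line is bb[st:m], and the emitted groups agree
lemma pv_inv (bb : List (List Int)) (min_dist : Int) (m : Nat) (hm : m ≤ bb.length) :
    ∃ st : Nat, st ≤ m ∧
      ((((PySem.List.pyRange 0 (m : Int) 1).filter (pvBreak bb min_dist)).map (· + 1)).foldl (pvEmit bb) ([], 0) =
        (((PySem.List.pyRange 0 (m : Int) 1).foldl (pvStepA bb min_dist) ([], [])).2, (st : Int))) ∧
      ((PySem.List.pyRange 0 (m : Int) 1).foldl (pvStepA bb min_dist) ([], [])).1 = (bb.drop st).take (m - st) := by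
  induction m with
  | zero =>
      refine ⟨0, le_refl _, ?_, ?_⟩ <;> simp [PySem.List.pyRange_one_eq_nil (by omega : (0:Int) ≤ 0)]
  | succ m ih =>
      obtain ⟨st, hst, hB, hA⟩ := ih (by omega)
      have hrange : PySem.List.pyRange 0 ((m + 1 : Nat) : Int) 1 =
          PySem.List.pyRange 0 (m : Int) 1 ++ [(m : Int)] := by
        have := PySem.List.pyRange_one_succ_right (a := 0) (b := (m : Int)) (by omega)
        push_cast
        rw [← this]
      have hmem : ((m : Nat) : Int) ≥ 0 := by omega
      have hmlt : m < bb.length := by omega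
      have hget : PySem.List.pyGetD bb ((m : Nat) : Int) [] = bb[m] := by
        simp [List.getElem?_eq_getElem hmlt]
      have htake : (bb.drop st).take (m - st) ++ [bb[m]] = (bb.drop st).take (m + 1 - st) := by
        have hlen : m - st < (bb.drop st).length := by simp; omega
        have hgd : (bb.drop st)[m - st] = bb[m] := by
          rw [List.getElem_drop]
          congr 1
          omega
        have hstep : (bb.drop st).take (m - st + 1) =
            (bb.drop st).take (m - st) ++ [(bb.drop st)[m - st]] := by
          rw [List.take_add_one, List.getElem?_eq_getElem hlen]
          rfl
        rw [hgd] at hstep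
        rw [← hstep]
        congr 1
        omega
      by_cases hbr : pvBreak bb min_dist (m : Int)
      · refine ⟨m + 1, le_refl _, ?_, ?_⟩
        · have hslice : PySem.List.slice bb (some (st : Int)) (some ((m : Int) + 1)) =
              (bb.drop st).take (m + 1 - st) := by
            have h1 : ((m : Int) + 1) = ((m + 1 : Nat) : Int) := by push_cast; ring
            rw [h1, PySem.List.slice_natCast]
          rw [hrange, List.filter_append, List.map_append, List.foldl_append, List.foldl_append, hB]
          simp only [List.filter_cons, hbr, if_pos, List.filter_nil, List.map_cons, List.map_nil,
            List.foldl_cons, List.foldl_nil, pvEmit, pvStepA_eq]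
          rw [hslice, hA, hget, htake]
          congr 1
        · rw [hrange, List.foldl_append]
          simp [pvStepA_eq, hbr]
      · refine ⟨st, by omega, ?_, ?_⟩
        · rw [hrange, List.filter_append, List.map_append, List.foldl_append, List.foldl_append, hB]
          simp only [List.filter_cons, hbr, Bool.false_eq_true, if_false, List.filter_nil,
            List.map_nil, List.foldl_nil]
          simp [pvStepA_eq, hbr]
        · rw [hrange, List.foldl_append]
          simp only [List.foldl_cons, List.foldl_nil, pvStepA_eq, hbr, Bool.false_eq_true, if_false]
          rw [hA, hget, htake]

-- ===== VERDICT (by name: the statement is the Claim_ definition above) =====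
theorem grouping_subroutine_spec : Claim_equal_grouping_subroutine := by
  intro bb min_dist max_dist _hdom hpre
  obtain ⟨hne, -⟩ := hpre
  unfold Spec_grouping_subroutine
  simp only [grouping_subroutine, grouping_subroutine_alt]
  have hlen : 1 ≤ bb.length := List.length_pos_iff.mpr hne
  have hcast : ((bb.length : Int) - 1) = ((bb.length - 1 : Nat) : Int) := by omega
  obtain ⟨st, hst, hB, hA⟩ := pv_inv bb min_dist (bb.length - 1) (by omega)
  have hstlt : st < bb.length := by omega
  have hdropne : bb.drop st ≠ [] := by
    simp [List.drop_eq_nil_iff]; omega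
  have hlast : PySem.List.pyGetD bb (-1) [] = (bb.drop st).getLast hdropne := by
    rw [PySem.List.pyGetD_neg_one bb [] hne, List.getLast_drop]
  have hdl : (bb.drop st).take (bb.length - 1 - st) = (bb.drop st).dropLast := by
    rw [List.dropLast_eq_take]
    congr 1
    simp
    omega
  have hline : (bb.drop st).take (bb.length - 1 - st) ++ [PySem.List.pyGetD bb (-1) []] = bb.drop st := by
    rw [hdl, hlast, List.dropLast_append_getLast]
  have hslice : PySem.List.slice bb (some (st : Int)) (some (bb.length : Int)) = bb.drop st := by
    rw [PySem.List.slice_natCast]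
    exact List.take_of_length_le (by simp)
  rw [hcast, List.foldl_append, hB]
  simp only [List.foldl_cons, List.foldl_nil, pvEmit]
  rw [hA, hline, hslice]
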